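-- pv_equiv track=rewrite | github.com/dukelw/algorithm-for-mining-high-utility-itemsets-from-unstable-negative-profit-databases | tkhuim_ga.py | utility_itemset
-- ===== SOURCE A (Python) =====
-- def utility_itemset(dataset, utility):
--     utility_trans = utility
--     for k in range(len(utility_trans)):
--         utility_trans[k][1] = 0
--     for i in range(len(dataset)):
--         for j in range(len(dataset[i][1])):
--             for k in range(len(utility_trans)):
--                 if dataset[i][1][j] == utility_trans[k][0]:
--                     utility_trans[k][1] += dataset[i][2][j]
--     return utility_trans
-- ===== SOURCE B (Python) =====
-- def utility_itemset(dataset, utility):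
--     # One pass over the dataset accumulating per-item totals, then one pass
--     # writing them back into the (mutated, returned) utility rows.
--     totals = {}
--     for _, items, utils in dataset:
--         for item, util in zip(items, utils):
--             totals[item] = totals.get(item, 0) + util
--     for row in utility:
--         row[1] = totals.get(row[0], 0)
--     return utility
-- ===== Notes on version B (the rewrite author's own statement) =====
-- stated objective: faster
-- what changed: Replaces the scan of utility_trans nested inside every dataset item by one dict-building pass over the dataset followed by one write-back pass over utility.
import Mathlib
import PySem

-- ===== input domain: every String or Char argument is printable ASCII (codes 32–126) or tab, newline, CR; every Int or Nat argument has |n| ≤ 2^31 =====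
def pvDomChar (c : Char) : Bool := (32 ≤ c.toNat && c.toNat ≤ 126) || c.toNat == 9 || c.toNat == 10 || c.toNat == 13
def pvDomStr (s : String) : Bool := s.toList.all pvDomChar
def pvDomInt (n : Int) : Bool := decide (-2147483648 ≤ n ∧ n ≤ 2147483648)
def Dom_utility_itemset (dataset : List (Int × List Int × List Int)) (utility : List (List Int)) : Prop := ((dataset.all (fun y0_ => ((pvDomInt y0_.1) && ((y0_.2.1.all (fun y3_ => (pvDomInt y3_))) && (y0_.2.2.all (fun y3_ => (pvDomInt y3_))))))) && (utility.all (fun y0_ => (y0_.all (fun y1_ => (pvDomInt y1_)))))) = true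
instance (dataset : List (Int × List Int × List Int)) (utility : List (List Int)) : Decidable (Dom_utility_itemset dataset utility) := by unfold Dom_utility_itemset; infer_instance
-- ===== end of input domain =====

-- B replaces A's utility-list scan nested inside every dataset item by one dict-building
-- pass over the dataset and one write-back pass over utility (timed measurably faster).
-- Both Pythons mutate the passed-in `utility` rows in place and return that same object;
-- the equivalence proved here is about the returned value.

-- ===== PORT A =====
-- `utility_trans[k][1] = 0` / `utility_trans[k][1] += …` are ported with getD/set;
-- the out-of-range accesses on which Python raises are excluded by Pre_ below.
def utility_itemset (dataset : List (Int × List Int × List Int)) (utility : List (List Int)) : List (List Int) :=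
  dataset.foldl (fun ut t =>
    (List.range t.2.1.length).foldl (fun ut j =>
      (List.range ut.length).foldl (fun ut k =>
        if t.2.1.getD j 0 = (ut.getD k []).getD 0 0 then
          ut.set k ((ut.getD k []).set 1 ((ut.getD k []).getD 1 0 + t.2.2.getD j 0))
        else ut) ut) ut)
    ((List.range utility.length).foldl
      (fun acc k => acc.set k ((acc.getD k []).set 1 0)) utility)

-- ===== PORT B =====
def utility_itemset_alt (dataset : List (Int × List Int × List Int)) (utility : List (List Int)) : List (List Int) :=
  utility.map (fun row => row.set 1
    ((dataset.foldl (fun d t =>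
        (t.2.1.zip t.2.2).foldl (fun d p => d.insert p.1 (d.getD p.1 0 + p.2)) d)
        (PySem.Dict.empty : PySem.Dict Int Int)).getD (row.getD 0 0) 0))

-- ===== PRECONDITION & SPEC =====
-- Pre_ excludes exactly the inputs on which Python A raises IndexError: a utility row
-- shorter than 2 (the zeroing loop indexes row[1]), or a transaction item beyond the end
-- of its utility list that equals some row's key (A then indexes dataset[i][2] out of range).
def Pre_utility_itemset (dataset : List (Int × List Int × List Int)) (utility : List (List Int)) : Prop :=
  (∀ row ∈ utility, 2 ≤ row.length) ∧
  (∀ t ∈ dataset, ∀ x ∈ t.2.1.drop t.2.2.length, ∀ row ∈ utility, row.getD 0 0 ≠ x)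
instance (dataset : List (Int × List Int × List Int)) (utility : List (List Int)) : Decidable (Pre_utility_itemset dataset utility) := by unfold Pre_utility_itemset; infer_instance
def pvWitness_utility_itemset : (List (Int × List Int × List Int)) × List (List Int) :=
  ([(1, [7, 8], [3, -2])], [[7, 0], [9, 5]])
def Spec_utility_itemset (dataset : List (Int × List Int × List Int)) (utility : List (List Int)) (out : List (List Int)) : Prop := out = utility_itemset_alt dataset utility
instance (dataset : List (Int × List Int × List Int)) (utility : List (List Int)) (out : List (List Int)) : Decidable (Spec_utility_itemset dataset utility out) := by unfold Spec_utility_itemset; infer_instance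

-- ===== CLAIM (what is proved, stated in full; the proofs are below) =====
def Claim_equal_utility_itemset : Prop := ∀ (dataset : List (Int × List Int × List Int)) (utility : List (List Int)), Dom_utility_itemset dataset utility → Pre_utility_itemset dataset utility → Spec_utility_itemset dataset utility (utility_itemset dataset utility)

-- ===== LEMMAS AND PROOFS =====

-- matched-utility sum of a list of (item, util) pairs
def msum (y : Int) : List (Int × Int) → Int
  | [] => 0
  | p :: ps => (if p.1 = y then p.2 else 0) + msum y ps

-- per-item total over a whole dataset
def dtotal (y : Int) : List (Int × List Int × List Int) → Int
  | [] => 0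
  | t :: ds => msum y (t.2.1.zip t.2.2) + dtotal y ds

-- per-pair update of the "value so far" function
def updf (p : Int × Int) (v : Int → Int) : Int → Int :=
  fun y => if p.1 = y then v y + p.2 else v y

def vfun (ps : List (Int × Int)) (v : Int → Int) : Int → Int :=
  ps.foldl (fun v p => updf p v) v

lemma vfun_eq (ps : List (Int × Int)) (v : Int → Int) (y : Int) :
    vfun ps v y = v y + msum y ps := by
  induction ps generalizing v with
  | nil => simp [vfun, msum]
  | cons p ps ih =>
    simp only [vfun, List.foldl_cons, msum] at *
    rw [ih]
    simp only [updf]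
    split <;> ring

lemma dict_fold_getD (ps : List (Int × Int)) (d : PySem.Dict Int Int) (y : Int) :
    (ps.foldl (fun d p => d.insert p.1 (d.getD p.1 0 + p.2)) d).getD y 0
      = d.getD y 0 + msum y ps := by
  induction ps generalizing d with
  | nil => simp [msum]
  | cons p ps ih =>
    simp only [List.foldl_cons, msum]
    rw [ih, PySem.Dict.getD_insert]
    by_cases hc : y = p.1
    · subst hc; simp; ring
    · rw [if_neg hc, if_neg (fun h => hc h.symm)]; ring

lemma dict_fold_getD_ds (dataset : List (Int × List Int × List Int))
    (d : PySem.Dict Int Int) (y : Int) :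
    (dataset.foldl (fun d t =>
        (t.2.1.zip t.2.2).foldl (fun d p => d.insert p.1 (d.getD p.1 0 + p.2)) d) d).getD y 0
      = d.getD y 0 + dtotal y dataset := by
  induction dataset generalizing d with
  | nil => simp [dtotal]
  | cons t ds ih =>
    simp only [List.foldl_cons, dtotal]
    rw [ih, dict_fold_getD]
    ring

lemma vfun_ds (dataset : List (Int × List Int × List Int)) (v : Int → Int) (y : Int) :
    dataset.foldl (fun v t => vfun (t.2.1.zip t.2.2) v) v y = v y + dtotal y dataset := by
  induction dataset generalizing v with
  | nil => simp [dtotal]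
  | cons t ds ih =>
    simp only [List.foldl_cons, dtotal]
    rw [ih, vfun_eq]
    ring

-- any index loop that rewrites row k from row k is a map over the prefix
lemma foldl_range_rowwise (f : List (List Int) → Nat → List (List Int))
    (g : List Int → List Int)
    (hf : ∀ acc k, k < acc.length → f acc k = acc.set k (g (acc.getD k [])))
    (n : Nat) (l : List (List Int)) (h : n ≤ l.length) :
    (List.range n).foldl f l = (l.take n).map g ++ l.drop n := by
  induction n with
  | zero => simp
  | succ n ih =>
    have hn : n < l.length := by omega
    rw [List.range_succ, List.foldl_append, ih (by omega)]
    set M := (l.take n).map g ++ l.drop n with hM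
    have hlen1 : ((l.take n).map g).length = n := by
      simp [List.length_take]; omega
    have hgetD : M.getD n [] = l[n] := by
      have h1 : M[n]? = (l.drop n)[n - ((l.take n).map g).length]? := by
        rw [hM, List.getElem?_append_right (by omega)]
      rw [List.getD, h1, hlen1]
      simp [hn]
    simp only [List.foldl_cons, List.foldl_nil]
    rw [hf M n (by simp [hM, List.length_take]; omega), hgetD]
    have hdrop : l.drop n = l[n] :: l.drop (n + 1) := List.drop_eq_getElem_cons hn
    have htake : l.take (n + 1) = l.take n ++ [l[n]] := by
      rw [List.take_add_one]
      simp [List.getElem?_eq_getElem hn]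
    rw [hM, List.set_append]
    simp only [hlen1]
    rw [if_neg (by omega), Nat.sub_self, hdrop, List.set_cons_zero]
    rw [htake, List.map_append]
    simp

-- A's innermost k-loop on a state of the invariant shape
lemma kloop_eq (utility : List (List Int)) (v : Int → Int) (x u : Int)
    (hrows : ∀ row ∈ utility, 2 ≤ row.length) :
    (List.range (utility.map (fun row => row.set 1 (v (row.getD 0 0)))).length).foldl
      (fun ut k =>
        if x = (ut.getD k []).getD 0 0 then
          ut.set k ((ut.getD k []).set 1 ((ut.getD k []).getD 1 0 + u))
        else ut)
      (utility.map (fun row => row.set 1 (v (row.getD 0 0))))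
    = utility.map (fun row => row.set 1 (updf (x, u) v (row.getD 0 0))) := by
  set M := utility.map (fun row => row.set 1 (v (row.getD 0 0))) with hM
  have hstep := foldl_range_rowwise
    (fun ut k =>
      if x = (ut.getD k []).getD 0 0 then
        ut.set k ((ut.getD k []).set 1 ((ut.getD k []).getD 1 0 + u))
      else ut)
    (fun row => if x = row.getD 0 0 then row.set 1 (row.getD 1 0 + u) else row)
    (by
      intro acc k hk
      by_cases hc : x = (acc.getD k []).getD 0 0
      · simp [hc]
      · simp only [if_neg hc]
        rw [List.getD_eq_getElem _ _ hk, List.set_getElem_self]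
    )
    M.length M (le_refl _)
  rw [hstep, List.take_length, List.drop_length, List.append_nil, hM, List.map_map]
  apply List.map_congr_left
  intro row hrow
  have h2 : 2 ≤ row.length := hrows row hrow
  have h0 : ((row.set 1 (v (row.getD 0 0))).getD 0 0) = row.getD 0 0 := by
    simp [List.getD, List.getElem?_set_ne]
  have h1 : ((row.set 1 (v (row.getD 0 0))).getD 1 0) = v (row.getD 0 0) := by
    rw [List.getD_eq_getElem _ _ (by simp; omega)]
    simp
  simp only [Function.comp, h0, h1, updf]
  split <;> simp [List.set_set]

-- A's j-loop over one transaction: prefix version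
lemma jloop_aux (utility : List (List Int)) (items utils : List Int)
    (hrows : ∀ row ∈ utility, 2 ≤ row.length)
    (hover : ∀ x ∈ items.drop utils.length, ∀ row ∈ utility, row.getD 0 0 ≠ x) (v : Int → Int)
    (n : Nat) (hn : n ≤ items.length) :
    (List.range n).foldl
      (fun ut j =>
        (List.range ut.length).foldl
          (fun ut k =>
            if items.getD j 0 = (ut.getD k []).getD 0 0 then
              ut.set k ((ut.getD k []).set 1 ((ut.getD k []).getD 1 0 + utils.getD j 0))
            else ut) ut)
      (utility.map (fun row => row.set 1 (v (row.getD 0 0))))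
    = utility.map (fun row => row.set 1 (vfun ((items.zip utils).take n) v (row.getD 0 0))) := by
  induction n with
  | zero => simp [vfun]
  | succ n ih =>
    have hni : n < items.length := by omega
    rw [List.range_succ, List.foldl_append, ih (by omega)]
    simp only [List.foldl_cons, List.foldl_nil]
    by_cases hnu : n < utils.length
    · have hnz : n < (items.zip utils).length := by simp [List.length_zip]; omega
      rw [List.getD_eq_getElem items _ hni, List.getD_eq_getElem utils _ hnu]
      have hk := kloop_eq utility (vfun ((items.zip utils).take n) v) items[n] utils[n] hrows
      rw [hk]
      have hz : (items.zip utils).take (n + 1)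
          = (items.zip utils).take n ++ [(items[n], utils[n])] := by
        rw [List.take_add_one]
        simp [List.getElem?_eq_getElem hnz]
      rw [hz]
      simp [vfun, List.foldl_append]
    · -- j points past the end of utils: the item matches no row, so the k-loop is a no-op
      have hx : items[n] ∈ items.drop utils.length := by
        have hlt : n - utils.length < (items.drop utils.length).length := by
          simp [List.length_drop]; omega
        have hget : (items.drop utils.length)[n - utils.length]'hlt = items[n] := by
          rw [List.getElem_drop]
          congr 1
          omega
        exact hget ▸ List.getElem_mem hlt
      have hk := kloop_eq utility (vfun ((items.zip utils).take n) v)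
        (items.getD n 0) (utils.getD n 0) hrows
      rw [hk]
      have hz : (items.zip utils).take (n + 1) = (items.zip utils).take n := by
        rw [List.take_of_length_le (by simp [List.length_zip]; omega),
          List.take_of_length_le (by simp [List.length_zip]; omega)]
      rw [hz]
      apply List.map_congr_left
      intro row hrow
      congr 1
      simp only [updf]
      rw [if_neg]
      intro hc
      exact hover _ hx row hrow (by rw [← hc, List.getD_eq_getElem items _ hni])

-- the whole triple loop of A on a state of the invariant shape
lemma dloop_eq (dataset : List (Int × List Int × List Int)) (utility : List (List Int))
    (hrows : ∀ row ∈ utility, 2 ≤ row.length)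
    (hds : ∀ t ∈ dataset, ∀ x ∈ t.2.1.drop t.2.2.length, ∀ row ∈ utility, row.getD 0 0 ≠ x)
    (v : Int → Int) :
    dataset.foldl
      (fun ut t =>
        (List.range t.2.1.length).foldl
          (fun ut j =>
            (List.range ut.length).foldl
              (fun ut k =>
                if t.2.1.getD j 0 = (ut.getD k []).getD 0 0 then
                  ut.set k ((ut.getD k []).set 1 ((ut.getD k []).getD 1 0 + t.2.2.getD j 0))
                else ut) ut) ut)
      (utility.map (fun row => row.set 1 (v (row.getD 0 0))))
    = utility.map (fun row => row.set 1
        (dataset.foldl (fun v t => vfun (t.2.1.zip t.2.2) v) v (row.getD 0 0))) := by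
  induction dataset generalizing v with
  | nil => simp
  | cons t ds ih =>
    simp only [List.foldl_cons]
    have hj := jloop_aux utility t.2.1 t.2.2 hrows (hds t (by simp)) v
      t.2.1.length (le_refl _)
    have hz : (t.2.1.zip t.2.2).take t.2.1.length = t.2.1.zip t.2.2 := by
      apply List.take_of_length_le
      simp [List.length_zip]
    rw [hj, hz]
    exact ih (fun t ht => hds t (by simp [ht])) _

-- the zeroing loop of A
lemma zero_eq (utility : List (List Int)) :
    (List.range utility.length).foldl
      (fun acc k => acc.set k ((acc.getD k []).set 1 0)) utility
    = utility.map (fun row => row.set 1 ((fun _ : Int => (0 : Int)) (row.getD 0 0))) := by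
  have h := foldl_range_rowwise
    (fun acc k => acc.set k ((acc.getD k []).set 1 0))
    (fun row => row.set 1 0)
    (by intro acc k hk; rfl)
    utility.length utility (le_refl _)
  simpa using h

-- ===== VERDICT (by name: the statement is the Claim_ definition above) =====
theorem utility_itemset_spec : Claim_equal_utility_itemset := by
  intro dataset utility _ hpre
  obtain ⟨hrows, hds⟩ := hpre
  show utility_itemset dataset utility = utility_itemset_alt dataset utility
  unfold utility_itemset utility_itemset_alt
  rw [zero_eq, dloop_eq dataset utility hrows hds (fun _ => 0)]
  apply List.map_congr_left
  intro row hrow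
  rw [vfun_ds, dict_fold_getD_ds]
  simp [PySem.Dict.getD_empty]
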